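-- pv_equiv track=rewrite | github.com/xuxpp/Python-3-exercise | 3-2D-Array/K/2D_array.py | get_non_perfect_nums
-- ===== SOURCE A (Python) =====
-- def get_non_perfect_nums(nums):
--     nonperfect_l = list()
--     for i in range(1, nums+1):
--         sumdiv = 0
--         for a in findalldivs(i):
--             sumdiv = a + sumdiv
--         if sumdiv != i:
--             nonperfect_l.append(i)
--     return nonperfect_l
--
-- def findalldivs(num):
--     l_s = list()
--     for x in range(1,num):
--         if num % x == 0:
--             l_s.append(x)
--     return l_s
-- ===== SOURCE B (Python) =====
-- def get_non_perfect_nums(nums):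
--     # Divisor-sum sieve: each d >= 1 adds itself to every proper multiple q*d <= nums.
--     s = [0] * (nums + 1)
--     for d in range(1, nums + 1):
--         for q in range(2, nums // d + 1):
--             s[q * d] += d
--     return [i for i in range(1, nums + 1) if s[i] != i]
-- ===== Notes on version B (the rewrite author's own statement) =====
-- stated objective: faster
-- what changed: Replaced the per-number trial-division divisor scan (findalldivs inside a loop) by a single divisor-sum sieve that adds each d to all its proper multiples, then filters 1..n against the sieved sums.
import Mathlib
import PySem

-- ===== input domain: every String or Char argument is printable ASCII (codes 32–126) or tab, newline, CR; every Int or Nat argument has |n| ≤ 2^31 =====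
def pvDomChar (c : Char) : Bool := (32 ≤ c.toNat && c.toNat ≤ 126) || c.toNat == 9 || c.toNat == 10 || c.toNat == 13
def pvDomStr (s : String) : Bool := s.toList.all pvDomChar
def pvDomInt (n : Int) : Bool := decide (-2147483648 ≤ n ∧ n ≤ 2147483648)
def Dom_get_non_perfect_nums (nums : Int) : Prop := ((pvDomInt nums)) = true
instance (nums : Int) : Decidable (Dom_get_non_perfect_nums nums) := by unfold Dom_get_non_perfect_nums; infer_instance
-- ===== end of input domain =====

-- B replaces A's per-number trial-division divisor scan by a divisor-sum sieve
-- (each d adds itself to all its proper multiples), which is asymptotically faster.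

-- ===== PORT A =====
def findalldivs (num : Int) : List Int :=
  (PySem.List.pyRange 1 num 1).foldl
    (fun l_s x => if PySem.Int.mod num x = 0 then l_s ++ [x] else l_s) []

def get_non_perfect_nums (nums : Int) : List Int :=
  (PySem.List.pyRange 1 (nums + 1) 1).foldl
    (fun nonperfect_l i =>
      let sumdiv := (findalldivs i).foldl (fun sumdiv a => a + sumdiv) 0
      if sumdiv ≠ i then nonperfect_l ++ [i] else nonperfect_l) []

-- ===== PORT B =====
def get_non_perfect_nums_alt (nums : Int) : List Int :=
  let s0 : List Int := List.replicate (nums + 1).toNat 0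
  let s := (PySem.List.pyRange 1 (nums + 1) 1).foldl
    (fun s d =>
      (PySem.List.pyRange 2 (PySem.Int.floordiv nums d + 1) 1).foldl
        (fun s q => PySem.List.pySetD s (q * d) (PySem.List.pyGetD s (q * d) 0 + d)) s) s0
  (PySem.List.pyRange 1 (nums + 1) 1).foldl
    (fun acc i => if PySem.List.pyGetD s i 0 ≠ i then acc ++ [i] else acc) []

-- ===== PRECONDITION & SPEC =====
def Spec_get_non_perfect_nums (nums : Int) (out : List Int) : Prop := out = get_non_perfect_nums_alt nums
instance (nums : Int) (out : List Int) : Decidable (Spec_get_non_perfect_nums nums out) := by unfold Spec_get_non_perfect_nums; infer_instance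

-- ===== CLAIM (what is proved, stated in full; the proofs are below) =====
def Claim_equal_get_non_perfect_nums : Prop := ∀ (nums : Int), Dom_get_non_perfect_nums nums → Spec_get_non_perfect_nums nums (get_non_perfect_nums nums)

-- ===== LEMMAS AND PROOFS =====

-- getD after set, with the index equality and the in-bounds test made explicit
lemma getD_set_int (xs : List Int) (n m : Nat) (v : Int) :
    (xs.set n v).getD m 0 = if m = n ∧ n < xs.length then v else xs.getD m 0 := by
  simp only [List.getD_eq_getElem?_getD, List.getElem?_set]
  split_ifs with h1 h2 h3 <;>
    first
      | rfl
      | (exfalso; omega)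
      | simp [List.getElem?_eq_none (by omega : xs.length ≤ m)]

-- the inner sieve loop preserves the length of the array
lemma sieve_inner_length (l : List Int) (d : Int) : ∀ s : List Int,
    (l.foldl (fun s q => PySem.List.pySetD s (q * d) (PySem.List.pyGetD s (q * d) 0 + d)) s).length
      = s.length := by
  induction l with
  | nil => intro s; rfl
  | cons x xs ih => intro s; simp only [List.foldl_cons]; rw [ih, PySem.List.length_pySetD]

-- value at cell i after the inner sieve loop 'for q in range(a, b): s[q*d] += d'
lemma sieve_inner_getD (d : Int) (hd : 0 < d) (i : Int) (hi : 0 ≤ i) (b : Int) :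
    ∀ (k : Nat) (a : Int), (b - a).toNat = k → 0 < a → ∀ s : List Int,
    PySem.List.pyGetD
      ((PySem.List.pyRange a b 1).foldl
        (fun s q => PySem.List.pySetD s (q * d) (PySem.List.pyGetD s (q * d) 0 + d)) s) i 0
    = PySem.List.pyGetD s i 0
      + (if d ∣ i ∧ a * d ≤ i ∧ i < b * d ∧ i.toNat < s.length then d else 0) := by
  intro k
  induction k with
  | zero =>
    intro a hk ha s
    have hba : b ≤ a := by omega
    rw [PySem.List.pyRange_one_eq_nil hba]
    have : ¬ (d ∣ i ∧ a * d ≤ i ∧ i < b * d ∧ i.toNat < s.length) := by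
      rintro ⟨-, h1, h2, -⟩
      have : b * d ≤ a * d := mul_le_mul_of_nonneg_right hba (le_of_lt hd)
      omega
    simp [this]
  | succ k ih =>
    intro a hk ha s
    have hab : a < b := by omega
    rw [PySem.List.pyRange_one_cons hab]
    simp only [List.foldl_cons]
    rw [ih (a + 1) (by omega) (by omega)]
    have had : (0:Int) ≤ a * d := by positivity
    rw [PySem.List.pySetD_of_nonneg _ _ had, PySem.List.pyGetD_of_nonneg _ _ hi,
        PySem.List.pyGetD_of_nonneg _ _ hi, PySem.List.pyGetD_of_nonneg _ _ had,
        List.length_set, getD_set_int]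
    by_cases hdvd : d ∣ i
    · obtain ⟨q, hq⟩ := hdvd
      have hq' : i = q * d := by rw [hq]; ring
      by_cases hia : i = a * d
      · -- this step writes cell i (if it is in bounds)
        have hqa : q = a := by
          have := hia.symm.trans hq'
          exact mul_right_cancel₀ (by omega) this.symm
        by_cases hlen : i.toNat < s.length
        · have h1 : i.toNat = (a * d).toNat := by rw [hia]
          rw [if_pos ⟨h1, by omega⟩]
          have h2 : ¬ ((a + 1) * d ≤ i) := by nlinarith
          have h3 : a * d ≤ i := le_of_eq hia.symm
          have h4 : i < b * d := by nlinarith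
          rw [if_neg (by tauto), if_pos ⟨⟨q, hq⟩, h3, h4, hlen⟩, h1]
          ring
        · have h1 : ¬ ((a * d).toNat < s.length) := by omega
          rw [if_neg (by tauto), if_neg (by tauto), if_neg (by tauto)]
      · -- cell i untouched by this step; the remaining condition is unchanged
        have hne : i.toNat ≠ (a * d).toNat := by omega
        rw [if_neg (by tauto)]
        have hiff : ((a + 1) * d ≤ i) ↔ (a * d ≤ i) := by
          constructor
          · intro h; nlinarith
          · intro h
            have hqa : a ≤ q := le_of_mul_le_mul_right (hq' ▸ h) hd
            have hqa' : q ≠ a := by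
              intro h'; exact hia (by rw [hq', h'])
            have : a + 1 ≤ q := by omega
            nlinarith
        simp only [hiff]
    · have hne : i.toNat ≠ (a * d).toNat := by
        intro h
        have : i = a * d := by omega
        exact hdvd ⟨a, by rw [this]; ring⟩
      rw [if_neg (by tauto), if_neg (by tauto), if_neg (by tauto)]

-- value at cell i after the whole sieve 'for d in range(a, n+1): for q in range(2, n//d+1): s[q*d] += d'
lemma sieve_outer_getD (n i : Int) (hi : 0 ≤ i) :
    ∀ (k : Nat) (a : Int), (n + 1 - a).toNat = k → 0 < a → ∀ s : List Int,
    PySem.List.pyGetD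
      ((PySem.List.pyRange a (n + 1) 1).foldl
        (fun s d =>
          (PySem.List.pyRange 2 (PySem.Int.floordiv n d + 1) 1).foldl
            (fun s q => PySem.List.pySetD s (q * d) (PySem.List.pyGetD s (q * d) 0 + d)) s) s) i 0
    = PySem.List.pyGetD s i 0
      + ((PySem.List.pyRange a (n + 1) 1).map
          (fun d => if d ∣ i ∧ 2 * d ≤ i ∧ i < (PySem.Int.floordiv n d + 1) * d ∧ i.toNat < s.length
                    then d else 0)).sum := by
  intro k
  induction k with
  | zero =>
    intro a hk ha s
    rw [PySem.List.pyRange_one_eq_nil (by omega)]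
    simp
  | succ k ih =>
    intro a hk ha s
    have hab : a < n + 1 := by omega
    rw [PySem.List.pyRange_one_cons hab]
    simp only [List.foldl_cons, List.map_cons, List.sum_cons]
    rw [ih (a + 1) (by omega) (by omega)]
    rw [sieve_inner_getD a ha i hi _ _ 2 rfl (by omega)]
    have hlen := sieve_inner_length (PySem.List.pyRange 2 (PySem.Int.floordiv n a + 1) 1) a s
    rw [hlen]
    ring

-- A's inner accumulation is the sum of the divisor list
lemma sumdiv_eq_sum (i : Int) :
    (findalldivs i).foldl (fun sumdiv a => a + sumdiv) 0 = (findalldivs i).sum := by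
  rw [PySem.List.foldl_congr_mem _ _ (fun acc x => acc + x) _ (fun acc x _ => by ring)]
  rw [PySem.List.foldl_add _ (fun x => x)]
  simp

-- sum of a filter as a sum of an if-map
lemma sum_filter_eq_sum_map (p : Int → Prop) [DecidablePred p] (l : List Int) :
    (l.filter (fun x => decide (p x))).sum = (l.map (fun x => if p x then x else 0)).sum := by
  induction l with
  | nil => rfl
  | cons x xs ih =>
    by_cases h : p x <;> simp [h, ih]

-- A's proper-divisor sum of i, as a sum over range(1, i)
lemma sumdivA_char (i : Int) :
    (findalldivs i).foldl (fun sumdiv a => a + sumdiv) 0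
      = ((PySem.List.pyRange 1 i 1).map (fun x => if x ∣ i then x else 0)).sum := by
  rw [sumdiv_eq_sum]
  unfold findalldivs
  rw [PySem.List.foldl_append_ite_eq_filter (fun x => PySem.Int.mod i x = 0)]
  rw [List.nil_append, sum_filter_eq_sum_map]
  apply congrArg
  apply List.map_congr_left
  intro x _
  simp [PySem.Int.mod_eq_zero_iff_dvd]

-- the two per-element divisor sums agree for 1 ≤ i ≤ n
lemma divsum_agree (n i : Int) (h1 : 1 ≤ i) (h2 : i ≤ n) :
    ((PySem.List.pyRange 1 i 1).map (fun x => if x ∣ i then x else 0)).sum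
      = ((PySem.List.pyRange 1 (n + 1) 1).map
          (fun d => if d ∣ i ∧ 2 * d ≤ i then d else 0)).sum := by
  rw [PySem.List.pyRange_one_append 1 i (n + 1) h1 (by omega), List.map_append, List.sum_append]
  have htail : ((PySem.List.pyRange i (n + 1) 1).map
      (fun d => if d ∣ i ∧ 2 * d ≤ i then d else 0)).sum = 0 := by
    apply List.sum_eq_zero
    intro x hx
    simp only [List.mem_map] at hx
    obtain ⟨d, hd, rfl⟩ := hx
    rw [PySem.List.mem_pyRange_one] at hd
    rw [if_neg]
    rintro ⟨-, hle⟩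
    omega
  rw [htail, add_zero]
  apply congrArg
  apply List.map_congr_left
  intro x hx
  rw [PySem.List.mem_pyRange_one] at hx
  by_cases hdvd : x ∣ i
  · obtain ⟨q, hq⟩ := hdvd
    have h2x : 2 * x ≤ i := by
      have hq2 : 2 ≤ q := by nlinarith
      nlinarith
    have hd' : x ∣ i := ⟨q, hq⟩
    rw [if_pos hd', if_pos ⟨hd', h2x⟩]
  · rw [if_neg hdvd, if_neg (by tauto)]

-- B's sieve cell i equals A's divisor sum of i, for 1 ≤ i ≤ n
lemma sieve_cell_eq_sumdiv (n i : Int) (h1 : 1 ≤ i) (h2 : i ≤ n) :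
    PySem.List.pyGetD
      ((PySem.List.pyRange 1 (n + 1) 1).foldl
        (fun s d =>
          (PySem.List.pyRange 2 (PySem.Int.floordiv n d + 1) 1).foldl
            (fun s q => PySem.List.pySetD s (q * d) (PySem.List.pyGetD s (q * d) 0 + d)) s)
        (List.replicate (n + 1).toNat 0)) i 0
    = (findalldivs i).foldl (fun sumdiv a => a + sumdiv) 0 := by
  rw [sieve_outer_getD n i (by omega) _ 1 rfl (by omega)]
  have h0 : PySem.List.pyGetD (List.replicate (n + 1).toNat (0:Int)) i 0 = 0 := by
    rw [PySem.List.pyGetD_of_nonneg _ _ (by omega)]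
    rcases Nat.lt_or_ge i.toNat (n+1).toNat with h | h
    · rw [List.getD_eq_getElem _ _ (by simpa using h)]; simp
    · exact List.getD_eq_default _ _ (by simpa using h)
  rw [h0, zero_add, sumdivA_char, divsum_agree n i h1 h2]
  apply congrArg
  apply List.map_congr_left
  intro d hd
  rw [PySem.List.mem_pyRange_one] at hd
  by_cases hdvd : d ∣ i ∧ 2 * d ≤ i
  · obtain ⟨⟨q, hq⟩, h2d⟩ := hdvd
    have hdpos : 0 < d := by omega
    have hqle : q ≤ PySem.Int.floordiv n d := by
      rw [PySem.Int.le_floordiv_iff_mul_le hdpos]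
      nlinarith
    have hlt : i < (PySem.Int.floordiv n d + 1) * d := by nlinarith
    have hlen : i.toNat < (List.replicate (n + 1).toNat (0:Int)).length := by
      simp only [List.length_replicate]; omega
    rw [if_pos ⟨⟨q, hq⟩, h2d, hlt, hlen⟩, if_pos ⟨⟨q, hq⟩, h2d⟩]
  · rw [if_neg (by tauto), if_neg hdvd]

-- ===== VERDICT (by name: the statement is the Claim_ definition above) =====
theorem get_non_perfect_nums_spec : Claim_equal_get_non_perfect_nums := by
  intro nums _
  unfold Spec_get_non_perfect_nums get_non_perfect_nums get_non_perfect_nums_alt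
  simp only []
  rw [PySem.List.foldl_append_ite_eq_filter
        (fun i => (findalldivs i).foldl (fun sumdiv a => a + sumdiv) 0 ≠ i),
      PySem.List.foldl_append_ite_eq_filter
        (fun i => PySem.List.pyGetD
          ((PySem.List.pyRange 1 (nums + 1) 1).foldl
            (fun s d =>
              (PySem.List.pyRange 2 (PySem.Int.floordiv nums d + 1) 1).foldl
                (fun s q => PySem.List.pySetD s (q * d) (PySem.List.pyGetD s (q * d) 0 + d)) s)
            (List.replicate (nums + 1).toNat 0)) i 0 ≠ i)]
  simp only [List.nil_append]
  apply List.filter_congr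
  intro i hi
  rw [PySem.List.mem_pyRange_one] at hi
  rw [sieve_cell_eq_sumdiv nums i hi.1 (by omega)]
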